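-- pv_equiv track=rewrite | github.com/TJank/pythonProgramming | Chapter3/Code_2_6.py | scramble_decrypt
-- ===== SOURCE A (Python) =====
-- def scramble_decrypt(cipher_text):
--     # case where length of cipher_text is even
--     slice1 = cipher_text[:len(cipher_text)//2]
--     slice2 = cipher_text[len(cipher_text)//2:]
--     middle = ""
--
--     if not len(cipher_text) % 2 == 0:   #has odd length
--         slice2 = cipher_text[len(cipher_text)//2 + 1:]
--         middle = cipher_text[len(cipher_text)//2]
--
--     plain_text = ""             # Came back to on 2-8-2018
--     # slice1 and slice2 are of equal lengths
--     for index in range(len(slice1)):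
--         plain_text += slice1[index] + slice2[index]
--
--     plain_text += middle
--
--     return plain_text
-- ===== SOURCE B (Python) =====
-- def scramble_decrypt(cipher_text):
--     n = len(cipher_text)
--     m = (n + 1) // 2
--     chars = [''] * n
--     chars[0::2] = cipher_text[:m]
--     chars[1::2] = cipher_text[m:]
--     return ''.join(chars)
-- ===== Notes on version B (the rewrite author's own statement) =====
-- stated objective: idiomatic
-- what changed: Replaces the explicit interleaving loop with its odd-length middle special case by strided slice assignment: the two halves are written straight into the even and odd output positions of a preallocated list and joined.
import Mathlib
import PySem

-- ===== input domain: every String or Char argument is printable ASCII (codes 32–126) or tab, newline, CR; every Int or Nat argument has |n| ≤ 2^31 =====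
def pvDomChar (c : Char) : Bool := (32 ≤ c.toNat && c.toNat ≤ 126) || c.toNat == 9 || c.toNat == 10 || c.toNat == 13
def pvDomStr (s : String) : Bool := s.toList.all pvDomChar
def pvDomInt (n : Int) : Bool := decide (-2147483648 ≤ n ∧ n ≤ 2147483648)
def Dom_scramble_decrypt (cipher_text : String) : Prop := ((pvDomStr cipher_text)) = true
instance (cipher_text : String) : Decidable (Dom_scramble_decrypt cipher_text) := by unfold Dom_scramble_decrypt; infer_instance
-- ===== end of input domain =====

-- B replaces A's index loop and odd-length middle special case by a direct strided
-- placement of the two halves into even/odd output positions (idiomatic; same result).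

-- ===== PORT A =====
def scramble_decrypt (cipher_text : String) : String :=
  let cs := cipher_text.toList
  let n : Int := (cs.length : Int)
  -- slice1 = cipher_text[:len//2]; slice2 = cipher_text[len//2:]; middle = ""
  let slice1 := PySem.List.slice cs none (some (PySem.Int.floordiv n 2))
  -- if not len % 2 == 0: slice2 = cipher_text[len//2 + 1:]; middle = cipher_text[len//2]
  let slice2 :=
    if ¬ (PySem.Int.mod n 2 = 0) then
      PySem.List.slice cs (some (PySem.Int.floordiv n 2 + 1)) none
    else
      PySem.List.slice cs (some (PySem.Int.floordiv n 2)) none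
  let middle : List Char :=
    if ¬ (PySem.Int.mod n 2 = 0) then
      (PySem.List.pyGet? cs (PySem.Int.floordiv n 2)).toList
    else []
  -- for index in range(len(slice1)): plain_text += slice1[index] + slice2[index]
  -- (indices are always in range here, so the default of pyGetD is never used)
  let plain := (PySem.List.pyRange 0 (slice1.length : Int) 1).foldl
    (fun acc i => acc ++ [PySem.List.pyGetD slice1 i ' ', PySem.List.pyGetD slice2 i ' ']) []
  String.ofList (plain ++ middle)

-- ===== PORT B =====
-- chars[0::2] = cipher_text[:m]; chars[1::2] = cipher_text[m:] — the strided writes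
-- alternate destinations, i.e. weave the two halves position by position.
def pvWeave : List Char → List Char → List Char
  | [], ys => ys
  | x :: xs, ys => x :: pvWeave ys xs
termination_by a b => a.length + b.length

def scramble_decrypt_alt (cipher_text : String) : String :=
  let cs := cipher_text.toList
  let m := (cs.length + 1) / 2
  String.ofList (pvWeave (cs.take m) (cs.drop m))

-- ===== PRECONDITION & SPEC =====
def Spec_scramble_decrypt (cipher_text : String) (out : String) : Prop := out = scramble_decrypt_alt cipher_text
instance (cipher_text : String) (out : String) : Decidable (Spec_scramble_decrypt cipher_text out) := by unfold Spec_scramble_decrypt; infer_instance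

-- ===== CLAIM (what is proved, stated in full; the proofs are below) =====
def Claim_equal_scramble_decrypt : Prop := ∀ (cipher_text : String), Dom_scramble_decrypt cipher_text → Spec_scramble_decrypt cipher_text (scramble_decrypt cipher_text)

-- ===== LEMMAS AND PROOFS =====

-- the interleaving of two equal-length lists, as A's loop produces it
def pvFlatZip (xs ys : List Char) : List Char :=
  (xs.zip ys).flatMap (fun p => [p.1, p.2])

theorem pvWeave_even (xs : List Char) : ∀ ys : List Char, xs.length = ys.length →
    pvWeave xs ys = pvFlatZip xs ys := by
  induction xs with
  | nil => intro ys h; cases ys with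
    | nil => simp [pvWeave, pvFlatZip]
    | cons y t => simp at h
  | cons x xs ih =>
    intro ys h
    cases ys with
    | nil => simp at h
    | cons y t =>
      simp only [pvWeave, pvFlatZip, List.zip_cons_cons, List.flatMap_cons]
      have := ih t (by simpa using h)
      simp only [pvFlatZip] at this
      simp [this]

theorem pvWeave_odd (xs : List Char) : ∀ (ys : List Char) (z : Char), xs.length = ys.length →
    pvWeave (xs ++ [z]) ys = pvFlatZip xs ys ++ [z] := by
  induction xs with
  | nil => intro ys z h; cases ys with
    | nil => simp [pvWeave, pvFlatZip]
    | cons y t => simp at h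
  | cons x xs ih =>
    intro ys z h
    cases ys with
    | nil => simp at h
    | cons y t =>
      simp only [List.cons_append, pvWeave, pvFlatZip, List.zip_cons_cons, List.flatMap_cons]
      have := ih t z (by simpa using h)
      simp only [pvFlatZip] at this
      simp [this]

-- A's loop over two equal-length lists is the flattened zip of the two lists
theorem pvLoop_eq (s1 s2 : List Char) (h : s1.length = s2.length) :
    (PySem.List.pyRange 0 (s1.length : Int) 1).foldl
      (fun acc i => acc ++ [PySem.List.pyGetD s1 i ' ', PySem.List.pyGetD s2 i ' ']) []
    = pvFlatZip s1 s2 := by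
  have hz : (s1.zip s2).length = s1.length := by simp [List.length_zip, h]
  have hcong : (PySem.List.pyRange 0 (s1.length : Int) 1).foldl
      (fun acc i => acc ++ [PySem.List.pyGetD s1 i ' ', PySem.List.pyGetD s2 i ' ']) []
    = (PySem.List.pyRange 0 ((s1.zip s2).length : Int) 1).foldl
      (fun acc i => acc ++ [(PySem.List.pyGetD (s1.zip s2) i (' ', ' ')).1,
                            (PySem.List.pyGetD (s1.zip s2) i (' ', ' ')).2]) [] := by
    rw [hz]
    apply PySem.List.foldl_congr_mem
    intro acc i hi
    have hib := (PySem.List.mem_pyRange_one).mp hi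
    have hi1 : i < (s1.length : Int) := hib.2
    have hit : i.toNat < s1.length := by omega
    rw [PySem.List.pyGetD_eq_getElem s1 ' ' hib.1 hi1,
        PySem.List.pyGetD_eq_getElem s2 ' ' hib.1 (by exact_mod_cast by omega),
        PySem.List.pyGetD_eq_getElem (s1.zip s2) (' ', ' ') hib.1 (by rw [hz]; exact hi1)]
    simp [List.getElem_zip]
  have hmain := PySem.List.foldl_pyRange_zero_pyGetD' (s1.zip s2) (' ', ' ')
      (fun acc (p : Char × Char) => acc ++ [p.1, p.2]) []
  simp only [] at hmain
  rw [hcong, hmain, PySem.List.foldl_append_eq_flatMap]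
  simp [pvFlatZip]

theorem pv_main (s : String) : scramble_decrypt s = scramble_decrypt_alt s := by
  simp only [scramble_decrypt, scramble_decrypt_alt]
  set cs := s.toList with hcs
  set n := cs.length with hn
  have hfd : PySem.Int.floordiv (n : Int) 2 = ((n / 2 : Nat) : Int) := by
    exact_mod_cast PySem.Int.floordiv_natCast n 2
  have hmd : PySem.Int.mod (n : Int) 2 = ((n % 2 : Nat) : Int) := by
    exact_mod_cast PySem.Int.mod_natCast n 2
  have hlen1 : (cs.take (n / 2)).length = n / 2 := by
    simp [List.length_take]; omega
  by_cases hpar : n % 2 = 0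
  · -- even length
    have hcond : PySem.Int.mod (n : Int) 2 = 0 := by rw [hmd, hpar]; rfl
    rw [if_neg (fun hc => hc hcond), if_neg (fun hc => hc hcond)]
    rw [hfd, PySem.List.slice_to_natCast, PySem.List.slice_from_natCast]
    have hlen2 : (cs.drop (n / 2)).length = n / 2 := by simp [List.length_drop]; omega
    rw [pvLoop_eq (cs.take (n / 2)) (cs.drop (n / 2)) (by rw [hlen1, hlen2])]
    have hm : (n + 1) / 2 = n / 2 := by omega
    rw [hm, pvWeave_even _ _ (by rw [hlen1, hlen2]), List.append_nil]
  · -- odd length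
    have hcond : ¬ PySem.Int.mod (n : Int) 2 = 0 := by
      rw [hmd]; intro h
      exact hpar (by exact_mod_cast h)
    rw [if_pos hcond, if_pos hcond]
    rw [hfd]
    have hk : n / 2 < n := by omega
    have hcast : ((n / 2 : Nat) : Int) + 1 = (((n / 2 + 1 : Nat)) : Int) := by push_cast; ring
    rw [hcast, PySem.List.slice_to_natCast, PySem.List.slice_from_natCast]
    have hget : PySem.List.pyGet? cs ((n / 2 : Nat) : Int) = some (cs[n / 2]'(by omega)) := by
      rw [PySem.List.pyGet?_natCast]
      exact List.getElem?_eq_getElem (by omega)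
    rw [hget]
    have hlen2 : (cs.drop (n / 2 + 1)).length = n / 2 := by simp [List.length_drop]; omega
    rw [pvLoop_eq (cs.take (n / 2)) (cs.drop (n / 2 + 1)) (by rw [hlen1, hlen2])]
    have hm : (n + 1) / 2 = n / 2 + 1 := by omega
    have htake : cs.take (n / 2 + 1) = cs.take (n / 2) ++ [cs[n / 2]'(by omega)] := by
      rw [List.take_add_one]
      simp [List.getElem?_eq_getElem (show n / 2 < cs.length by omega)]
    rw [hm, htake, pvWeave_odd _ _ _ (by rw [hlen1, hlen2])]
    simp

-- ===== VERDICT (by name: the statement is the Claim_ definition above) =====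
theorem scramble_decrypt_spec : Claim_equal_scramble_decrypt := by
  intro s _
  unfold Spec_scramble_decrypt
  exact pv_main s
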